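-- pv_equiv track=rewrite | github.com/Hagarde/Info_sem2_2018-2019 | TP/TP08/TP08_elections.py | gain_date
-- ===== SOURCE A (Python) =====
-- def gain_date(cot):
--     liste = []
--     maxi = 0
--     t= 0
--     for i in range (len(cot)) :
--         for j in range (i) :
--             a =  cot[i]-cot[j]
--             liste.append(a)
--             temps = abs (i - j)
--             if a > maxi :
--                 maxi = a
--                 t = temps
--             elif a == maxi :
--                 if t >  temps : t = temps
--
--     return maxi , t
-- ===== SOURCE B (Python) =====
-- def gain_date(cot):
--     maxi = 0
--     t = 0
--     if not cot:
--         return maxi, t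
--     minval = cot[0]
--     minidx = 0
--     for i in range(1, len(cot)):
--         v = cot[i]
--         a = v - minval
--         d = i - minidx
--         if a > maxi or (a == maxi and d < t):
--             maxi = a
--             t = d
--         if v <= minval:
--             minval = v
--             minidx = i
--     return maxi, t
-- ===== Notes on version B (the rewrite author's own statement) =====
-- stated objective: faster
-- what changed: Replaced the O(n^2) double loop over all pairs by a single pass that tracks the running minimum of the prefix and the latest index attaining it, updating the best gain and its minimal distance in O(1) per element.
import Mathlib
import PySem

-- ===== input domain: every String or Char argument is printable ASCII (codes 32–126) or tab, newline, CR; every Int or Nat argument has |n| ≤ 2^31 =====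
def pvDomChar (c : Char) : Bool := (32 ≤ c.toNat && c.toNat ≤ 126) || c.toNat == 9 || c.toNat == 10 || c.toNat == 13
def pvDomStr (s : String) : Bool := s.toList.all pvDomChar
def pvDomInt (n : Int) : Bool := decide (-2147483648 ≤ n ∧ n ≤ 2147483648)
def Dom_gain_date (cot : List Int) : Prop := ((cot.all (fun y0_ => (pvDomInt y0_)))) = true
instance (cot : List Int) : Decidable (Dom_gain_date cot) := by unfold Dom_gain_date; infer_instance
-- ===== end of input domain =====

-- B replaces A's O(n^2) double loop by a single pass tracking the running prefix minimum
-- and the latest index attaining it (objective: faster, asymptotic).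

-- ===== PORT A =====
-- state: (liste, (maxi, t)); the inner-loop body, as in A
def stepA (cot : List Int) (i : Int) (s2 : List Int × Int × Int) (j : Int) :
    List Int × Int × Int :=
  let liste := s2.1
  let maxi := s2.2.1
  let t := s2.2.2
  let a := PySem.List.pyGetD cot i 0 - PySem.List.pyGetD cot j 0
  let liste := liste ++ [a]
  let temps := |i - j|
  if a > maxi then (liste, a, temps)
  else if a = maxi then (liste, maxi, if t > temps then temps else t)
  else (liste, maxi, t)

def gain_date (cot : List Int) : Int × Int :=
  let st := (PySem.List.pyRange 0 cot.length 1).foldl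
    (fun (s : List Int × Int × Int) i =>
      (PySem.List.pyRange 0 i 1).foldl (stepA cot i) s)
    ([], 0, 0)
  st.2

-- ===== PORT B =====
-- state: ((maxi, t), (minval, minidx)); the loop body of B
def stepB (cot : List Int) (s : (Int × Int) × Int × Int) (i : Int) :
    (Int × Int) × Int × Int :=
  let v := PySem.List.pyGetD cot i 0
  let a := v - s.2.1
  let d := i - s.2.2
  let mt := if a > s.1.1 ∨ (a = s.1.1 ∧ d < s.1.2) then (a, d) else s.1
  if v ≤ s.2.1 then (mt, v, i) else (mt, s.2)

def gain_date_alt (cot : List Int) : Int × Int :=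
  match cot with
  | [] => (0, 0)
  | c0 :: _ =>
    let st := (PySem.List.pyRange 1 cot.length 1).foldl (stepB cot) ((0, 0), c0, 0)
    st.1

-- ===== PRECONDITION & SPEC =====
def Spec_gain_date (cot : List Int) (out : Int × Int) : Prop := out = gain_date_alt cot
instance (cot : List Int) (out : Int × Int) : Decidable (Spec_gain_date cot out) := by unfold Spec_gain_date; infer_instance

-- ===== CLAIM (what is proved, stated in full; the proofs are below) =====
def Claim_equal_gain_date : Prop := ∀ (cot : List Int), Dom_gain_date cot → Spec_gain_date cot (gain_date cot)

-- ===== LEMMAS AND PROOFS =====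

-- the (maxi, t) update both programs perform for one candidate gain `a` at distance `temps`
def upd (s : Int × Int) (a temps : Int) : Int × Int :=
  if a > s.1 then (a, temps)
  else if a = s.1 then (s.1, if s.2 > temps then temps else s.2)
  else s

-- (min of cot[0..K], latest index attaining it), indices as Int
def pmK (cot : List Int) : Nat → Int × Int
  | 0 => (PySem.List.pyGetD cot 0 0, 0)
  | K+1 =>
    let s := pmK cot K
    let v := PySem.List.pyGetD cot ((K : Int)+1) 0
    if v ≤ s.1 then (v, (K : Int)+1) else s

lemma pmK_idx (cot : List Int) (K : Nat) : 0 ≤ (pmK cot K).2 ∧ (pmK cot K).2 ≤ (K : Int) := by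
  induction K with
  | zero => simp [pmK]
  | succ K ih =>
    simp only [pmK]
    split_ifs <;> simp <;> omega

lemma upd_upd_lt (s : Int × Int) (g d a e : Int) (h : a < g) :
    upd (upd s g d) a e = upd s g d := by
  unfold upd
  split_ifs <;> first | rfl | omega

lemma upd_upd_gt (s : Int × Int) (g d a e : Int) (h : g < a) :
    upd (upd s g d) a e = upd s a e := by
  unfold upd
  split_ifs <;> first | rfl | omega

lemma upd_upd_eq (s : Int × Int) (g d e : Int) (h : e < d) :
    upd (upd s g d) g e = upd s g e := by
  unfold upd
  split_ifs <;> first | rfl | omega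

-- A's inner fold, with the (unused) liste component projected away
lemma stepA_eq (cot : List Int) (i j : Int) (L : List Int) (p : Int × Int) :
    stepA cot i (L, p) j
      = (L ++ [PySem.List.pyGetD cot i 0 - PySem.List.pyGetD cot j 0],
         upd p (PySem.List.pyGetD cot i 0 - PySem.List.pyGetD cot j 0) (|i - j|)) := by
  unfold stepA upd
  split_ifs <;> simp_all
  rw [if_neg (by omega)]

-- A's inner fold, with the (unused) liste component projected away
lemma proj_inner (cot : List Int) (i : Int) (idxs : List Int) (L : List Int) (p : Int × Int) :
    (idxs.foldl (stepA cot i) (L, p)).2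
    = idxs.foldl (fun q j => upd q (PySem.List.pyGetD cot i 0 - PySem.List.pyGetD cot j 0) (|i - j|)) p := by
  induction idxs generalizing L p with
  | nil => rfl
  | cons j rest ih =>
    simp only [List.foldl_cons, stepA_eq]
    exact ih _ _

-- the inner fold of A over j < K+1 collapses to one `upd` with the prefix minimum
lemma inner_fold (cot : List Int) (x : Int) (K : Nat) (i : Int) (hi : (K : Int) < i)
    (s : Int × Int) :
    (PySem.List.pyRange 0 ((K : Int)+1) 1).foldl
        (fun q j => upd q (x - PySem.List.pyGetD cot j 0) (|i - j|)) s
    = upd s (x - (pmK cot K).1) (i - (pmK cot K).2) := by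
  induction K generalizing s with
  | zero =>
    rw [show ((0:Nat):Int)+1 = (0:Int)+1 by norm_num, PySem.List.pyRange_one_singleton]
    simp only [List.foldl_cons, List.foldl_nil, pmK]
    rw [show |i - 0| = i - 0 by rw [abs_of_nonneg] ; omega]
  | succ K ih =>
    have hsp : PySem.List.pyRange 0 (((K+1:Nat):Int)+1) 1
        = PySem.List.pyRange 0 ((K:Int)+1) 1 ++ [(K:Int)+1] := by
      rw [show (((K+1:Nat):Int)+1) = ((K:Int)+1)+1 by push_cast; ring]
      exact PySem.List.pyRange_one_succ_right (by positivity)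
    rw [hsp, List.foldl_append, ih (by push_cast at hi ⊢; omega)]
    simp only [List.foldl_cons, List.foldl_nil]
    have habs : |i - ((K:Int)+1)| = i - ((K:Int)+1) := by
      rw [abs_of_nonneg]; push_cast at hi; omega
    rw [habs]
    have hidx := pmK_idx cot K
    simp only [pmK]
    set v := PySem.List.pyGetD cot ((K:Int)+1) 0 with hv
    rcases lt_trichotomy v (pmK cot K).1 with h | h | h
    · rw [upd_upd_gt _ _ _ _ _ (by omega), if_pos (le_of_lt h)]
    · rw [h, upd_upd_eq _ _ _ _ (by have := hidx; push_cast at hi; omega), if_pos le_rfl]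
    · rw [upd_upd_lt _ _ _ _ _ (by omega), if_neg (by omega)]

lemma stepB_eq (cot : List Int) (s : (Int × Int) × Int × Int) (i : Int) :
    stepB cot s i
      = (upd s.1 (PySem.List.pyGetD cot i 0 - s.2.1) (i - s.2.2),
         if PySem.List.pyGetD cot i 0 ≤ s.2.1 then (PySem.List.pyGetD cot i 0, i) else s.2) := by
  rcases s with ⟨⟨m, t⟩, mv, mi⟩
  dsimp only [stepB, upd]
  split_ifs <;> simp_all

-- the joint invariant: after processing indices < K+1, A's (maxi, t) equals B's,
-- and B's (minval, minidx) is the prefix minimum with its latest index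
lemma main_inv (c0 : Int) (rest : List Int) (K : Nat) :
    ((PySem.List.pyRange 0 ((K : Int)+1) 1).foldl
        (fun (s : List Int × Int × Int) i =>
          (PySem.List.pyRange 0 i 1).foldl (stepA (c0 :: rest) i) s) ([], 0, 0)).2
      = ((PySem.List.pyRange 1 ((K : Int)+1) 1).foldl (stepB (c0 :: rest)) ((0, 0), c0, 0)).1
    ∧ ((PySem.List.pyRange 1 ((K : Int)+1) 1).foldl (stepB (c0 :: rest)) ((0, 0), c0, 0)).2
      = pmK (c0 :: rest) K := by
  induction K with
  | zero =>
    rw [show ((0:Nat):Int)+1 = (0:Int)+1 by norm_num, PySem.List.pyRange_one_singleton,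
        show (0:Int)+1 = 1 by norm_num, PySem.List.pyRange_one_eq_nil le_rfl]
    simp [PySem.List.pyRange_one_eq_nil, pmK]
  | succ K ih =>
    have h2 : (((K+1:Nat)):Int)+1 = ((K:Int)+1)+1 := by push_cast; ring
    have hA : PySem.List.pyRange 0 ((((K+1:Nat)):Int)+1) 1
        = PySem.List.pyRange 0 ((K:Int)+1) 1 ++ [(K:Int)+1] := by
      rw [h2]; exact PySem.List.pyRange_one_succ_right (by omega)
    have hB : PySem.List.pyRange 1 ((((K+1:Nat)):Int)+1) 1
        = PySem.List.pyRange 1 ((K:Int)+1) 1 ++ [(K:Int)+1] := by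
      rw [h2]; exact PySem.List.pyRange_one_succ_right (by omega)
    rw [hA, hB, List.foldl_append, List.foldl_append]
    set SA := (PySem.List.pyRange 0 ((K : Int)+1) 1).foldl
        (fun (s : List Int × Int × Int) i =>
          (PySem.List.pyRange 0 i 1).foldl (stepA (c0 :: rest) i) s) ([], 0, 0) with hSA
    set SB := (PySem.List.pyRange 1 ((K : Int)+1) 1).foldl (stepB (c0 :: rest)) ((0, 0), c0, 0)
      with hSB
    simp only [List.foldl_cons, List.foldl_nil]
    have hproj : ((PySem.List.pyRange 0 ((K:Int)+1) 1).foldl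
        (stepA (c0 :: rest) ((K:Int)+1)) (SA.1, SA.2)).2
        = upd SA.2 (PySem.List.pyGetD (c0 :: rest) ((K:Int)+1) 0 - (pmK (c0 :: rest) K).1)
            (((K:Int)+1) - (pmK (c0 :: rest) K).2) := by
      rw [proj_inner, inner_fold _ _ _ _ (by omega)]
    rw [stepB_eq]
    refine ⟨?_, ?_⟩
    · show ((PySem.List.pyRange 0 ((K:Int)+1) 1).foldl (stepA (c0 :: rest) ((K:Int)+1)) SA).2 = _
      rw [show SA = (SA.1, SA.2) from rfl] at *
      rw [hproj]
      rw [ih.1, ih.2]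
    · rw [ih.2]
      dsimp only [pmK]

-- ===== VERDICT (by name: the statement is the Claim_ definition above) =====
theorem gain_date_spec : Claim_equal_gain_date := by
  unfold Claim_equal_gain_date Spec_gain_date
  intro cot _
  match cot with
  | [] => rfl
  | c0 :: rest =>
    show (gain_date (c0 :: rest)) = _
    unfold gain_date gain_date_alt
    simp only [List.length_cons]
    have hc : (((rest.length + 1 : Nat)) : Int) = ((rest.length : Nat) : Int) + 1 := by
      push_cast; ring
    rw [hc]
    exact (main_inv c0 rest rest.length).1
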